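-- pv_equiv track=rewrite | github.com/ryongseong/programmers | 무지의 먹방 라이브/무지의먹방라이브.py | solution
-- ===== SOURCE A (Python) =====
-- from collections import deque
--
-- def solution(food_times, k):
--
--     food_list = deque()
--
--     for index, food_time in enumerate(food_times):
--         food_list.append([index, food_time])
--
--     total_time = sum(food_times)
--
--     if total_time <= k:
--         return -1
--
--     while food_list:
--         food = food_list.popleft()
--
--         food[1] -= 1
--         if food[1] != 0:
--             food_list.append(food)
--         k -= 1
--         if k == 0:
--             break
--
--
--     answer = food_list[0][0] + 1
--     return answer
-- ===== SOURCE B (Python) =====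
-- def solution(food_times, k):
--     total = sum(food_times)
--     if total <= k:
--         return -1
--     finite = sorted((t, i) for i, t in enumerate(food_times) if t > 0)
--     remain = len(food_times)
--     prev = 0
--     idx = 0
--     m = len(finite)
--     while idx < m:
--         t = finite[idx][0]
--         need = (t - prev) * remain
--         if k < need:
--             break
--         j = idx + 1
--         while j < m and finite[j][0] == t:
--             j += 1
--         k -= need
--         remain -= (j - idx)
--         prev = t
--         idx = j
--     survivors = [i for i, t in enumerate(food_times) if t <= 0 or t > prev]
--     return survivors[k % remain] + 1
-- ===== Notes on version B (the rewrite author's own statement) =====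
-- stated objective: faster
-- what changed: Replaces A's second-by-second deque simulation (O(k) pops) by sorting the positive food times and eliminating whole rounds in bulk per distinct time, then indexing the surviving foods by k mod remain.
import Mathlib
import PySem

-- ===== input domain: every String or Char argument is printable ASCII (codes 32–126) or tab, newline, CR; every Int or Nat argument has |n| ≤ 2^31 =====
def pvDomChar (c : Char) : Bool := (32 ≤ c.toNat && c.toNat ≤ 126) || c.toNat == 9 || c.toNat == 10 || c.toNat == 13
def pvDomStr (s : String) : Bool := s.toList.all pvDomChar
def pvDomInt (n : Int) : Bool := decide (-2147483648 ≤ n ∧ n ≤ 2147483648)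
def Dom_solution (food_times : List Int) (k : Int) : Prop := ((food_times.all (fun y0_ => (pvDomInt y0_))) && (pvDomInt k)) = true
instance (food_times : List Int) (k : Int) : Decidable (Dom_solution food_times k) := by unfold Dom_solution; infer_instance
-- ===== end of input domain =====

-- B replaces A's second-by-second deque simulation with sort + bulk round elimination + modular indexing (asymptotically faster).

-- ===== PORT A =====
-- the while loop; fuel = k.toNat is only a totality guard (for 1 ≤ k the Python loop runs at most k iterations)
def solLoopA : Nat → List (Int × Int) → Int → List (Int × Int) × Int
  | 0, q, k => (q, k)
  | fuel + 1, q, k =>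
    match q with
    | [] => ([], k)
    | f :: rest =>
      let f' : Int × Int := (f.1, f.2 - 1)
      let q' := if f'.2 ≠ 0 then rest ++ [f'] else rest
      if k - 1 = 0 then (q', k - 1) else solLoopA fuel q' (k - 1)

def solution (food_times : List Int) (k : Int) : Int :=
  let food_list := PySem.List.enumerate food_times 0
  let total_time := food_times.sum
  if total_time ≤ k then -1
  else
    let res := solLoopA k.toNat food_list k
    match res.1 with
    | f :: _ => f.1 + 1
    | [] => 0      -- Python raises IndexError here (outside Pre_solution)

-- ===== PORT B =====
-- B's while loop over the sorted positive (time, index) pairs; the inner j-advance is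
-- takeWhile/dropWhile; the fuel (list length) is only a totality guard
def solLoopB : Nat → List (Int × Int) → Int → Int → Int → Int × Int × Int
  | _, [], remain, prev, k => (prev, remain, k)
  | 0, _ :: _, remain, prev, k => (prev, remain, k)   -- never reached: fuel starts at the list length
  | fuel + 1, (t, _i) :: tl, remain, prev, k =>
    if k < (t - prev) * remain then (prev, remain, k)
    else solLoopB fuel (tl.dropWhile (fun p => p.1 == t))
           (remain - (1 + ((tl.takeWhile (fun p => p.1 == t)).length : Int)))
           t (k - (t - prev) * remain)

def solution_alt (food_times : List Int) (k : Int) : Int :=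
  let total := food_times.sum
  if total ≤ k then -1
  else
    -- Python's sorted((t,i)) on tuples: indices are distinct and increasing within equal times,
    -- so the stable sort by first component is exact here
    let finite := PySem.List.sorted
      (((PySem.List.enumerate food_times 0).filter (fun x => decide (0 < x.2))).map (fun x => (x.2, x.1)))
      (fun p => p.1) false
    let res := solLoopB finite.length finite (food_times.length : Int) 0 k
    let prev := res.1
    let remain := res.2.1
    let r := res.2.2
    let survivors := ((PySem.List.enumerate food_times 0).filter
      (fun x => decide (x.2 ≤ 0 ∨ prev < x.2))).map (fun x => x.1)
    match PySem.List.pyGet? survivors (PySem.Int.mod r remain) with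
    | some i => i + 1
    | none => 0    -- Python raises here (outside Pre_solution)

-- ===== PRECONDITION & SPEC =====
-- Pre_ excludes exactly k ≤ 0 < sum(food_times): there A never returns (its loop either drains
-- the deque and food_list[0] raises IndexError, or cycles forever on a food with time ≤ 0).
def Pre_solution (food_times : List Int) (k : Int) : Prop := food_times.sum ≤ k ∨ 1 ≤ k
instance (food_times : List Int) (k : Int) : Decidable (Pre_solution food_times k) := by
  unfold Pre_solution; infer_instance

def pvWitness_solution : List Int × Int := ([3, 1, 2], 5)

def Spec_solution (food_times : List Int) (k : Int) (out : Int) : Prop := out = solution_alt food_times k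
instance (food_times : List Int) (k : Int) (out : Int) : Decidable (Spec_solution food_times k out) := by
  unfold Spec_solution; infer_instance

-- ===== CLAIM (what is proved, stated in full; the proofs are below) =====
def Claim_equal_solution : Prop := ∀ (food_times : List Int) (k : Int), Dom_solution food_times k → Pre_solution food_times k → Spec_solution food_times k (solution food_times k)

-- ===== LEMMAS AND PROOFS =====

-- one second of A's simulation
def astep (q : List (Int × Int)) : List (Int × Int) :=
  match q with
  | [] => []
  | f :: rest => if f.2 - 1 ≠ 0 then rest ++ [(f.1, f.2 - 1)] else rest

-- one full round: everybody decremented, the finished foods dropped, order kept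
def rnd (q : List (Int × Int)) : List (Int × Int) :=
  q.filterMap (fun f => if f.2 - 1 = 0 then none else some (f.1, f.2 - 1))

-- the deque after all rounds up to level p: survivors (time ≤ 0 or time > p) with times reduced by p
def Dp (E : List (Int × Int)) (p : Int) : List (Int × Int) :=
  E.filterMap (fun x => if x.2 ≤ 0 ∨ p < x.2 then some (x.1, x.2 - p) else none)

def Ssum (q : List (Int × Int)) : Int := (q.map (fun x => x.2)).sum

theorem Dp_zero (E : List (Int × Int)) : Dp E 0 = E := by
  induction E with
  | nil => rfl
  | cons x tl ih =>
    have h : x.2 ≤ 0 ∨ (0 : Int) < x.2 := by omega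
    simp only [Dp, List.filterMap_cons, if_pos h, sub_zero] at *
    simp [ih]

theorem Ssum_astep (q : List (Int × Int)) (h : q ≠ []) : Ssum (astep q) = Ssum q - 1 := by
  match q with
  | f :: rest =>
    simp only [astep, Ssum]
    split <;> (simp only [List.map_append, List.map_cons, List.map_nil, List.sum_append,
      List.sum_cons, List.sum_nil] <;> omega)

theorem astep_iter_ne_nil (q : List (Int × Int)) (j : Nat) (h : (j : Int) < Ssum q) :
    astep^[j] q ≠ [] ∧ Ssum (astep^[j] q) = Ssum q - j := by
  induction j with
  | zero =>
    refine ⟨?_, by simp⟩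
    intro hq
    rw [Function.iterate_zero_apply] at hq
    subst hq
    simp only [Ssum, List.map_nil, List.sum_nil] at h
    omega
  | succ j ih =>
    have hj : (j : Int) < Ssum q := by push_cast at h ⊢; omega
    obtain ⟨hne, hs⟩ := ih hj
    rw [Function.iterate_succ_apply']
    have hs' : Ssum (astep (astep^[j] q)) = Ssum q - (j + 1) := by
      rw [Ssum_astep _ hne, hs]; push_cast; ring
    refine ⟨?_, by rw [hs']; push_cast; ring⟩
    intro hq; rw [hq] at hs'
    simp only [Ssum, List.map_nil, List.sum_nil] at hs' h ⊢
    push_cast at h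
    omega

theorem astep_nil (j : Nat) : astep^[j] [] = [] :=
  Function.iterate_fixed rfl j

theorem solLoopA_succ (m : Nat) (f : Int × Int) (rest : List (Int × Int)) (k : Int) :
    solLoopA (m + 1) (f :: rest) k =
      if k - 1 = 0 then (astep (f :: rest), k - 1) else solLoopA m (astep (f :: rest)) (k - 1) := by
  by_cases h : k - 1 = 0 <;> simp [solLoopA, astep, h]

theorem solLoopA_eq_iterate (n : Nat) (q : List (Int × Int)) (k : Int)
    (hn : 1 ≤ n) (hk : k = (n : Int)) (hne : ∀ j, j < n → astep^[j] q ≠ []) :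
    solLoopA n q k = (astep^[n] q, 0) := by
  induction n generalizing q k with
  | zero => omega
  | succ m ih =>
    have h0 : q ≠ [] := by simpa using hne 0 (by omega)
    match q, h0 with
    | f :: rest, _ =>
      rw [solLoopA_succ]
      by_cases hm : m = 0
      · subst hm
        have hk1 : k - 1 = 0 := by omega
        have e1 : astep^[0 + 1] (f :: rest) = astep (f :: rest) := by simp
        rw [if_pos hk1, hk1, e1]
      · have hne' : ∀ j, j < m → astep^[j] (astep (f :: rest)) ≠ [] := by
          intro j hj
          have := hne (j + 1) (by omega)
          rwa [Function.iterate_succ_apply] at this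
        have ih' := ih (astep (f :: rest)) (k - 1) (by omega) (by omega) hne'
        have hk1 : ¬ (k - 1 = 0) := by omega
        rw [if_neg hk1, ih', Function.iterate_succ_apply]

theorem astep_iterate_append (p s : List (Int × Int)) :
    astep^[p.length] (p ++ s) = s ++ rnd p := by
  induction p generalizing s with
  | nil => simp [rnd]
  | cons f tl ih =>
    have : astep ((f :: tl) ++ s) =
        if f.2 - 1 ≠ 0 then tl ++ (s ++ [(f.1, f.2 - 1)]) else tl ++ s := by
      simp only [astep, List.cons_append]; split <;> simp
    rw [List.length_cons, Function.iterate_succ_apply, this]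
    by_cases h : f.2 - 1 = 0
    · rw [if_neg (by simpa using h), ih]
      simp [rnd, List.filterMap_cons, h]
    · rw [if_pos h, ih]
      simp [rnd, List.filterMap_cons, h]

theorem astep_round (q : List (Int × Int)) : astep^[q.length] q = rnd q := by
  have := astep_iterate_append q []
  simpa using this

theorem rnd_Dp (E : List (Int × Int)) (p : Int) (hp : 0 ≤ p) :
    rnd (Dp E p) = Dp E (p + 1) := by
  induction E with
  | nil => rfl
  | cons x tl ih =>
    obtain ⟨i, t⟩ := x
    by_cases h1 : t ≤ 0 ∨ p < t <;> by_cases h2 : t ≤ 0 ∨ p + 1 < t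
    · have h3 : ¬ ((t - p) - 1 = 0) := by omega
      have e1 : Dp ((i, t) :: tl) p = (i, t - p) :: Dp tl p := by
        simp [Dp, List.filterMap_cons, if_pos h1]
      have e2 : Dp ((i, t) :: tl) (p + 1) = (i, t - (p + 1)) :: Dp tl (p + 1) := by
        simp [Dp, List.filterMap_cons, if_pos h2]
      have e3 : rnd ((i, t - p) :: Dp tl p) = (i, t - p - 1) :: rnd (Dp tl p) := by
        simp [rnd, List.filterMap_cons, h3]
      rw [e1, e3, ih, e2]
      have : t - p - 1 = t - (p + 1) := by ring
      rw [this]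
    · have h3 : (t - p) - 1 = 0 := by omega
      have e1 : Dp ((i, t) :: tl) p = (i, t - p) :: Dp tl p := by
        simp [Dp, List.filterMap_cons, if_pos h1]
      have e2 : Dp ((i, t) :: tl) (p + 1) = Dp tl (p + 1) := by
        simp [Dp, List.filterMap_cons, if_neg h2]
      have e3 : rnd ((i, t - p) :: Dp tl p) = rnd (Dp tl p) := by
        simp [rnd, List.filterMap_cons, h3]
      rw [e1, e3, ih, e2]
    · omega
    · have e1 : Dp ((i, t) :: tl) p = Dp tl p := by
        simp [Dp, List.filterMap_cons, if_neg h1]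
      have e2 : Dp ((i, t) :: tl) (p + 1) = Dp tl (p + 1) := by
        simp [Dp, List.filterMap_cons, if_neg h2]
      rw [e1, ih, e2]

-- predicate stability: no time in (p, q] ⇒ Dp at q is Dp at p shifted
theorem Dp_shift (E : List (Int × Int)) (p q : Int) (hpq : p ≤ q)
    (h : ∀ x ∈ E, ¬ (p < x.2 ∧ x.2 ≤ q)) :
    Dp E q = (Dp E p).map (fun y => (y.1, y.2 - (q - p))) := by
  induction E with
  | nil => rfl
  | cons x tl ih =>
    have hx := h x (by simp)
    have htl : ∀ y ∈ tl, ¬ (p < y.2 ∧ y.2 ≤ q) := fun y hy => h y (by simp [hy])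
    simp only [Dp, List.filterMap_cons] at *
    by_cases h1 : x.2 ≤ 0 ∨ p < x.2
    · have h2 : x.2 ≤ 0 ∨ q < x.2 := by omega
      rw [if_pos h1, if_pos h2, ih htl]
      simp only [List.map_cons]
      congr 2; omega
    · have h2 : ¬ (x.2 ≤ 0 ∨ q < x.2) := by omega
      rw [if_neg h1, if_neg h2, ih htl]

theorem Dp_len_eq (E : List (Int × Int)) (p q : Int) (hpq : p ≤ q)
    (h : ∀ x ∈ E, ¬ (p < x.2 ∧ x.2 ≤ q)) :
    (Dp E q).length = (Dp E p).length := by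
  rw [Dp_shift E p q hpq h]; simp

theorem bulk (E : List (Int × Int)) (m : Nat) (p : Int) (hp : 0 ≤ p)
    (h : ∀ x ∈ E, p < x.2 → p + (m : Int) ≤ x.2) :
    astep^[m * (Dp E p).length] (Dp E p) = Dp E (p + m) := by
  induction m generalizing p with
  | zero => simp
  | succ m ih =>
    have hL : astep^[(Dp E p).length] (Dp E p) = Dp E (p + 1) := by
      rw [astep_round, rnd_Dp E p hp]
    by_cases hm : m = 0
    · subst hm
      have e : (0 + 1) * (Dp E p).length = (Dp E p).length := by ring
      rw [e, hL]
      norm_num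
    have hlen : (Dp E (p + 1)).length = (Dp E p).length := by
      refine Dp_len_eq E p (p + 1) (by omega) ?_
      intro x hx hc
      have hh := h x hx hc.1
      push_cast at hh
      omega
    have hyp : ∀ x ∈ E, p + 1 < x.2 → (p + 1) + (m : Int) ≤ x.2 := by
      intro x hx hc
      have hh := h x hx (by omega)
      push_cast at hh ⊢
      omega
    have ihh := ih (p + 1) (by omega) hyp
    rw [show (m + 1) * (Dp E p).length = m * (Dp E p).length + (Dp E p).length by ring,
      Function.iterate_add_apply, hL, ← hlen, ihh]
    congr 1; push_cast; ring

-- sorted prefix extraction: with t0 minimal, takeWhile/dropWhile on (== t0) are filters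
theorem tw_dw_filter (l : List (Int × Int)) (t0 : Int)
    (hs : l.Pairwise (fun a b => a.1 ≤ b.1)) (hmin : ∀ x ∈ l, t0 ≤ x.1) :
    l.takeWhile (fun p => p.1 == t0) = l.filter (fun p => p.1 == t0) ∧
    l.dropWhile (fun p => p.1 == t0) = l.filter (fun p => ¬ p.1 == t0) := by
  induction l with
  | nil => simp
  | cons x tl ih =>
    have hs' := (List.pairwise_cons.mp hs).2
    have hx1 := (List.pairwise_cons.mp hs).1
    have hmin' : ∀ y ∈ tl, t0 ≤ y.1 := fun y hy => hmin y (by simp [hy])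
    obtain ⟨h1, h2⟩ := ih hs' hmin'
    by_cases hx : x.1 = t0
    · have hb : (x.1 == t0) = true := by simp [hx]
      constructor
      · simp [List.takeWhile_cons, List.filter_cons, hb, hx, h1]
      · simp [List.dropWhile_cons, List.filter_cons, hb, hx, h2]
    · have hb : (x.1 == t0) = false := by simp [hx]
      have hgt : t0 < x.1 := lt_of_le_of_ne (hmin x (by simp)) (Ne.symm hx)
      have hfil : tl.filter (fun p => p.1 == t0) = [] := by
        rw [List.filter_eq_nil_iff]
        intro y hy
        have := hx1 y hy
        simp only [beq_iff_eq]
        omega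
      constructor
      · simp [List.takeWhile_cons, List.filter_cons, hb, hx, hfil]
      · simp [List.dropWhile_cons, List.filter_cons, hb, hx]
        symm
        rw [List.filter_eq_self]
        intro y hy
        have := hx1 y hy
        simp
        omega

theorem Dp_len_countP (E : List (Int × Int)) (p : Int) :
    (Dp E p).length = E.countP (fun x => decide (x.2 ≤ 0 ∨ p < x.2)) := by
  induction E with
  | nil => rfl
  | cons x tl ih =>
    by_cases h : x.2 ≤ 0 ∨ p < x.2
    · have e : Dp (x :: tl) p = (x.1, x.2 - p) :: Dp tl p := by
        simp [Dp, List.filterMap_cons, if_pos h]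
      rw [e, List.length_cons, List.countP_cons, ih]
      simp [h]
    · have e : Dp (x :: tl) p = Dp tl p := by
        simp [Dp, List.filterMap_cons, if_neg h]
      rw [e, List.countP_cons, ih]
      simp [h]

theorem Dp_count_split (E : List (Int × Int)) (prev t0 : Int) (h0 : 0 ≤ prev) (hlt : prev < t0)
    (hmin : ∀ x ∈ E, prev < x.2 → t0 ≤ x.2) :
    (Dp E prev).length = (Dp E t0).length + E.countP (fun x => x.2 == t0) := by
  rw [Dp_len_countP, Dp_len_countP]
  induction E with
  | nil => rfl
  | cons x tl ih =>
    rw [List.countP_cons, List.countP_cons, List.countP_cons,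
      ih (fun y hy hc => hmin y (by simp [hy]) hc)]
    have hx := hmin x (by simp)
    split_ifs <;> simp_all <;> omega

theorem Dp_map_fst (E : List (Int × Int)) (p : Int) :
    (Dp E p).map (fun y => y.1) =
      (E.filter (fun x => decide (x.2 ≤ 0 ∨ p < x.2))).map (fun x => x.1) := by
  induction E with
  | nil => rfl
  | cons x tl ih =>
    by_cases h : x.2 ≤ 0 ∨ p < x.2
    · rw [show Dp (x :: tl) p = (x.1, x.2 - p) :: Dp tl p by
        simp [Dp, List.filterMap_cons, if_pos h]]
      rw [List.filter_cons, if_pos (by simpa using h)]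
      simp only [List.map_cons]
      rw [ih]
    · rw [show Dp (x :: tl) p = Dp tl p by simp [Dp, List.filterMap_cons, if_neg h]]
      rw [List.filter_cons, if_neg (by simpa using h)]
      exact ih

-- the main invariant of B's loop
theorem solLoopB_inv (E : List (Int × Int)) (fuel : Nat) (fin : List (Int × Int))
    (remain prev k : Int)
    (hfuel : fin.length ≤ fuel)
    (hp : 0 ≤ prev) (hk : 0 ≤ k)
    (hsort : fin.Pairwise (fun a b => a.1 ≤ b.1))
    (hperm : fin.Perm ((E.filter (fun x => decide (prev < x.2))).map (fun x => (x.2, x.1))))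
    (hrem : remain = ((Dp E prev).length : Int)) :
    ∃ P R r, solLoopB fuel fin remain prev k = (P, R, r) ∧
      0 ≤ P ∧ 0 ≤ r ∧ r ≤ k ∧ R = ((Dp E P).length : Int) ∧
      astep^[(k - r).toNat] (Dp E prev) = Dp E P ∧
      (∀ x ∈ E, P < x.2 → r < (x.2 - P) * R) := by
  induction fuel generalizing fin remain prev k with
  | zero =>
    have : fin = [] := by
      cases fin with
      | nil => rfl
      | cons a tl => simp at hfuel
    subst this
    refine ⟨prev, remain, k, rfl, hp, hk, le_refl _, hrem, by simp, ?_⟩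
    intro x hx hc
    have : (x.2, x.1) ∈ ((E.filter (fun x => decide (prev < x.2))).map (fun x => (x.2, x.1))) := by
      simp only [List.mem_map]
      exact ⟨x, by simp [List.mem_filter, hx, hc], rfl⟩
    rw [← hperm.mem_iff] at this
    simp at this
  | succ fuel ih =>
    cases fin with
    | nil =>
      refine ⟨prev, remain, k, rfl, hp, hk, le_refl _, hrem, by simp, ?_⟩
      intro x hx hc
      have hm : (x.2, x.1) ∈ ((E.filter (fun x => decide (prev < x.2))).map (fun x => (x.2, x.1))) := by
        simp only [List.mem_map, List.mem_filter]
        exact ⟨x, ⟨hx, by simpa using hc⟩, rfl⟩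
      rw [← hperm.mem_iff] at hm
      simp at hm
    | cons hd tl =>
      obtain ⟨t, i⟩ := hd
      have hsort' := (List.pairwise_cons.mp hsort).2
      have hminfin : ∀ y ∈ (t, i) :: tl, t ≤ y.1 := by
        intro y hy
        rcases List.mem_cons.mp hy with h | h
        · rw [h]
        · exact (List.pairwise_cons.mp hsort).1 y h
      have hmintl : ∀ y ∈ tl, t ≤ y.1 := fun y hy => hminfin y (by simp [hy])
      have hminE : ∀ x ∈ E, prev < x.2 → t ≤ x.2 := by
        intro x hx hc
        have hm : (x.2, x.1) ∈ (t, i) :: tl := by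
          rw [hperm.mem_iff]
          simp only [List.mem_map, List.mem_filter]
          exact ⟨x, ⟨hx, by simpa using hc⟩, rfl⟩
        simpa using hminfin _ hm
      have hpt : prev < t := by
        have hm : (t, i) ∈ ((E.filter (fun x => decide (prev < x.2))).map (fun x => (x.2, x.1))) := by
          rw [← hperm.mem_iff]; simp
        simp only [List.mem_map, List.mem_filter] at hm
        obtain ⟨x, ⟨hx, hc⟩, hex⟩ := hm
        have h1 : x.2 = t := congrArg Prod.fst hex
        simp only [decide_eq_true_eq] at hc
        omega
      have hR0 : (0 : Int) ≤ remain := by rw [hrem]; exact Int.natCast_nonneg _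
      by_cases hbr : k < (t - prev) * remain
      · refine ⟨prev, remain, k, by simp [solLoopB, if_pos hbr], hp, hk, le_refl _, hrem,
          by simp, ?_⟩
        intro x hx hc
        have hle : (t - prev) * remain ≤ (x.2 - prev) * remain :=
          mul_le_mul_of_nonneg_right (by have := hminE x hx hc; omega) hR0
        omega
      · obtain ⟨htw, hdw⟩ := tw_dw_filter tl t hsort' hmintl
        -- the count of foods with time exactly t
        have hcnt : ((t, i) :: tl).countP (fun p => p.1 == t) =
            E.countP (fun x => x.2 == t) := by
          rw [hperm.countP_eq]
          rw [List.countP_map, List.countP_filter]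
          refine List.countP_congr ?_
          intro a ha
          by_cases hat : a.2 = t
          · simp [Function.comp, hat]; omega
          · simp [Function.comp, hat]
        have hcnt2 : 1 + (tl.takeWhile (fun p => p.1 == t)).length =
            E.countP (fun x => x.2 == t) := by
          rw [htw, ← hcnt, List.countP_cons]
          rw [List.countP_eq_length_filter]
          simp
          omega
        have hsplitlen := Dp_count_split E prev t hp hpt hminE
        have hremnew : remain - (1 + ((tl.takeWhile (fun p => p.1 == t)).length : Int)) =
            ((Dp E t).length : Int) := by
          rw [hrem]
          push_cast [← hcnt2] at hsplitlen ⊢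
          omega
        have hpermnew : (tl.dropWhile (fun p => p.1 == t)).Perm
            ((E.filter (fun x => decide (t < x.2))).map (fun x => (x.2, x.1))) := by
          rw [hdw]
          have hfilfin : ((t, i) :: tl).filter (fun p => ¬ p.1 == t) =
              tl.filter (fun p => ¬ p.1 == t) := by
            simp [List.filter_cons]
          rw [← hfilfin]
          refine (hperm.filter _).trans ?_
          rw [List.filter_map, List.filter_filter]
          refine List.Perm.of_eq ?_
          congr 1
          refine List.filter_congr ?_
          intro x hx
          by_cases hxt : t < x.2
          · have h1 : prev < x.2 := by omega
            have h2 : ¬ (x.2 = t) := by omega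
            simp [Function.comp, hxt, h1, h2]
          · by_cases hpx : prev < x.2
            · have hxe : x.2 = t := by have := hminE x hx hpx; omega
              simp [Function.comp, hxt, hxe]
            · simp [Function.comp, hxt, hpx]
        have hsortnew : (tl.dropWhile (fun p => p.1 == t)).Pairwise (fun a b => a.1 ≤ b.1) := by
          rw [hdw]
          exact List.Pairwise.sublist List.filter_sublist hsort' 
        have hfuel' : (tl.dropWhile (fun p => p.1 == t)).length ≤ fuel := by
          have h1 := List.length_dropWhile_le (fun p : Int × Int => p.1 == t) tl
          simp only [List.length_cons] at hfuel
          omega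
        have hneed0 : 0 ≤ (t - prev) * remain := mul_nonneg (by omega) hR0
        obtain ⟨P, R, r, heq, hP, hr0, hrk, hR, hstep, hbound⟩ :=
          ih (tl.dropWhile (fun p => p.1 == t))
            (remain - (1 + ((tl.takeWhile (fun p => p.1 == t)).length : Int)))
            t (k - (t - prev) * remain) hfuel' (by omega) (by omega) hsortnew hpermnew hremnew
        refine ⟨P, R, r, ?_, hP, hr0, by omega, hR, ?_, hbound⟩
        · simpa [solLoopB, if_neg hbr] using heq
        · have hbulk : astep^[((t - prev) * remain).toNat] (Dp E prev) = Dp E t := by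
            have htp : (0 : Int) ≤ t - prev := by omega
            have hmn : ((t - prev) * remain).toNat = (t - prev).toNat * (Dp E prev).length := by
              rw [hrem, ← Int.toNat_of_nonneg htp, ← Nat.cast_mul, Int.toNat_natCast,
                Int.toNat_natCast]
            have hhyp : ∀ x ∈ E, prev < x.2 → prev + ((t - prev).toNat : Int) ≤ x.2 := by
              intro x hx hc
              have := hminE x hx hc
              rw [Int.toNat_of_nonneg htp]
              omega
            rw [hmn, bulk E (t - prev).toNat prev hp hhyp]
            congr 1
            rw [Int.toNat_of_nonneg htp]
            ring
          have hsplit : (k - r).toNat = (k - (t - prev) * remain - r).toNat +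
              ((t - prev) * remain).toNat := by omega
          rw [hsplit, Function.iterate_add_apply, hbulk, hstep]

theorem main_equiv (food_times : List Int) (k : Int) (h1 : 1 ≤ k) (h2 : k < food_times.sum) :
    solution food_times k = solution_alt food_times k := by
  have hnotle : ¬ food_times.sum ≤ k := by omega
  set E := PySem.List.enumerate food_times 0 with hE
  have hsum : Ssum E = food_times.sum := by
    unfold Ssum
    rw [hE, PySem.List.map_snd_enumerate]
  have hknn : (0 : Int) ≤ k := by omega
  have hne : ∀ j, j < k.toNat → astep^[j] E ≠ [] := by
    intro j hj
    refine (astep_iter_ne_nil E j ?_).1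
    rw [hsum]
    omega
  have hA : solLoopA k.toNat E k = (astep^[k.toNat] E, 0) :=
    solLoopA_eq_iterate k.toNat E k (by omega) (by omega) hne
  have hfin : astep^[k.toNat] E ≠ [] := by
    refine (astep_iter_ne_nil E k.toNat ?_).1
    rw [hsum]
    omega
  set fin0 := PySem.List.sorted ((E.filter (fun x => decide (0 < x.2))).map (fun x => (x.2, x.1)))
    (fun p : Int × Int => p.1) false with hfin0
  have hsort : fin0.Pairwise (fun a b => a.1 ≤ b.1) := PySem.List.sorted_pairwise _ _
  have hperm : fin0.Perm ((E.filter (fun x => decide (0 < x.2))).map (fun x => (x.2, x.1))) :=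
    PySem.List.sorted_perm _ _ _
  have hlen0 : ((food_times.length : Int)) = ((Dp E 0).length : Int) := by
    rw [Dp_zero, hE, PySem.List.length_enumerate]
  obtain ⟨P, R, r, heq, hP, hr0, hrk, hR, hstep, hbound⟩ :=
    solLoopB_inv E fin0.length fin0 (food_times.length) 0 k (le_refl _) (le_refl 0) hknn
      hsort hperm hlen0
  have hchain : astep^[k.toNat] E = astep^[r.toNat] (Dp E P) := by
    have hks : k.toNat = r.toNat + (k - r).toNat := by omega
    calc astep^[k.toNat] E = astep^[r.toNat + (k - r).toNat] (Dp E 0) := by rw [← hks, Dp_zero]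
      _ = astep^[r.toNat] (astep^[(k - r).toNat] (Dp E 0)) := Function.iterate_add_apply _ _ _ _
      _ = astep^[r.toNat] (Dp E P) := by rw [hstep]
  have hDpne : Dp E P ≠ [] := fun hnil => hfin (by rw [hchain, hnil, astep_nil])
  have hL0 : 0 < (Dp E P).length := List.length_pos_of_ne_nil hDpne
  obtain ⟨qn, rn, hsplitr, hrnL⟩ :
      ∃ qn rn, r.toNat = rn + qn * (Dp E P).length ∧ rn < (Dp E P).length :=
    ⟨r.toNat / (Dp E P).length, r.toNat % (Dp E P).length,
      (Nat.mod_add_div' r.toNat (Dp E P).length).symm, Nat.mod_lt _ hL0⟩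
  have hrint : r = (rn : Int) + (qn : Int) * ((Dp E P).length : Int) := by
    rw [← Int.toNat_of_nonneg hr0, hsplitr]
    push_cast
    ring
  have hqLr : ((qn : Int)) * ((Dp E P).length : Int) ≤ r := by
    have : (0 : Int) ≤ (rn : Int) := Int.natCast_nonneg _
    omega
  have hnomid : ∀ x ∈ E, ¬ (P < x.2 ∧ x.2 ≤ P + (qn : Int)) := by
    rintro x hx ⟨ha, hb⟩
    have hb1 := hbound x hx ha
    rw [hR] at hb1
    have hle : (x.2 - P) * ((Dp E P).length : Int) ≤ (qn : Int) * ((Dp E P).length : Int) :=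
      mul_le_mul_of_nonneg_right (by omega) (Int.natCast_nonneg _)
    exact absurd (lt_of_lt_of_le hb1 hle) (not_lt.mpr hqLr)
  have hqbulk : astep^[qn * (Dp E P).length] (Dp E P) = Dp E (P + (qn : Int)) := by
    refine bulk E qn P hP ?_
    intro x hx hc
    have h := hnomid x hx
    omega
  have hshift : Dp E (P + (qn : Int)) =
      (Dp E P).map (fun y => (y.1, y.2 - ((P + (qn : Int)) - P))) :=
    Dp_shift E P _ (by omega) hnomid
  have hlen2 : (Dp E (P + (qn : Int))).length = (Dp E P).length := by
    rw [hshift, List.length_map]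
  have hiter2 : astep^[r.toNat] (Dp E P) = astep^[rn] (Dp E (P + (qn : Int))) := by
    calc astep^[r.toNat] (Dp E P)
        = astep^[rn + qn * (Dp E P).length] (Dp E P) := by rw [← hsplitr]
      _ = astep^[rn] (astep^[qn * (Dp E P).length] (Dp E P)) := Function.iterate_add_apply _ _ _ _
      _ = _ := by rw [hqbulk]
  have hrr2 : rn < (Dp E (P + (qn : Int))).length := by
    rw [hlen2]; exact hrnL
  have hpart : astep^[rn] (Dp E (P + (qn : Int))) =
      (Dp E (P + (qn : Int)))[rn]'hrr2 ::
        ((Dp E (P + (qn : Int))).drop (rn + 1) ++ rnd ((Dp E (P + (qn : Int))).take rn)) := by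
    have h := astep_iterate_append ((Dp E (P + (qn : Int))).take rn)
      ((Dp E (P + (qn : Int))).drop rn)
    rw [List.take_append_drop] at h
    rw [List.length_take, min_eq_left (le_of_lt hrr2)] at h
    rw [h, List.drop_eq_getElem_cons hrr2]
    exact List.cons_append
  have hheadeq : ((Dp E (P + (qn : Int)))[rn]'hrr2).1 = ((Dp E P)[rn]'hrnL).1 := by
    simp only [hshift, List.getElem_map]
  -- A's value
  have hAval : solution food_times k = ((Dp E P)[rn]'hrnL).1 + 1 := by
    simp only [solution]
    rw [if_neg hnotle, ← hE, hA]
    simp only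
    rw [hchain, hiter2, hpart]
    simp only
    rw [hheadeq]
  -- B's value
  have hsurv : ((E.filter (fun x => decide (x.2 ≤ 0 ∨ P < x.2))).map (fun x => x.1)) =
      (Dp E P).map (fun y => y.1) := (Dp_map_fst E P).symm
  have hmod : PySem.Int.mod r R = ((rn : Nat) : Int) := by
    rw [hR, PySem.Int.mod_eq_emod_of_pos (by exact_mod_cast hL0), hrint]
    rw [show ((rn : Int) + (qn : Int) * ((Dp E P).length : Int)) =
      ((rn : Int) + ((Dp E P).length : Int) * (qn : Int)) from by ring]
    rw [Int.add_mul_emod_self_left]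
    exact Int.emod_eq_of_lt (Int.natCast_nonneg _) (by exact_mod_cast hrnL)
  have hBval : solution_alt food_times k = ((Dp E P)[rn]'hrnL).1 + 1 := by
    simp only [solution_alt]
    rw [if_neg hnotle, ← hE, ← hfin0, heq]
    simp only
    rw [hmod, hsurv, PySem.List.pyGet?_natCast]
    rw [List.getElem?_eq_getElem (by rw [List.length_map]; exact hrnL)]
    simp only [List.getElem_map]
  rw [hAval, hBval]

-- ===== VERDICT (by name: the statement is the Claim_ definition above) =====
theorem solution_spec : Claim_equal_solution := by
  intro food_times k _ hpre
  unfold Spec_solution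
  by_cases hs : food_times.sum ≤ k
  · simp only [solution, solution_alt, if_pos hs]
  · have h1 : 1 ≤ k := by rcases hpre with h | h <;> omega
    exact main_equiv food_times k h1 (by omega)
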